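-- pv_equiv track=rewrite | github.com/ahmetaltndg/case3-intent-classifier | scripts/evaluate.py | _analyze_errors_by_length
-- ===== SOURCE A (Python) =====
-- from typing import List, Dict, Any, Tuple
--
-- def _analyze_errors_by_length(errors: List[Dict]) -> Dict[str, int]:
--     """Analyze errors by text length"""
--     length_ranges = {
--         '1-5 words': 0,
--         '6-10 words': 0,
--         '11-15 words': 0,
--         '16+ words': 0
--     }
--
--     for error in errors:
--         length = error['text_length']
--         if length <= 5:
--             length_ranges['1-5 words'] += 1
--         elif length <= 10:
--             length_ranges['6-10 words'] += 1
--         elif length <= 15: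
--             length_ranges['11-15 words'] += 1
--         else:
--             length_ranges['16+ words'] += 1
--
--     return length_ranges
-- ===== SOURCE B (Python) =====
-- def _analyze_errors_by_length(errors):
--     lengths = [e['text_length'] for e in errors]
--     c5 = sum(1 for l in lengths if l <= 5)
--     c10 = sum(1 for l in lengths if l <= 10)
--     c15 = sum(1 for l in lengths if l <= 15)
--     return {
--         '1-5 words': c5,
--         '6-10 words': c10 - c5,
--         '11-15 words': c15 - c10,
--         '16+ words': len(lengths) - c15,
--     }
-- ===== Notes on version B (the rewrite author's own statement) =====
-- stated objective: alternative
-- what changed: Instead of selecting a bucket per element with an if/elif chain, B extracts the lengths once and computes cumulative counts (how many lengths are <=5, <=10, <=15) in staged passes, then forms each bucket as a difference of consecutive cumulative counts.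
import Mathlib
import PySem

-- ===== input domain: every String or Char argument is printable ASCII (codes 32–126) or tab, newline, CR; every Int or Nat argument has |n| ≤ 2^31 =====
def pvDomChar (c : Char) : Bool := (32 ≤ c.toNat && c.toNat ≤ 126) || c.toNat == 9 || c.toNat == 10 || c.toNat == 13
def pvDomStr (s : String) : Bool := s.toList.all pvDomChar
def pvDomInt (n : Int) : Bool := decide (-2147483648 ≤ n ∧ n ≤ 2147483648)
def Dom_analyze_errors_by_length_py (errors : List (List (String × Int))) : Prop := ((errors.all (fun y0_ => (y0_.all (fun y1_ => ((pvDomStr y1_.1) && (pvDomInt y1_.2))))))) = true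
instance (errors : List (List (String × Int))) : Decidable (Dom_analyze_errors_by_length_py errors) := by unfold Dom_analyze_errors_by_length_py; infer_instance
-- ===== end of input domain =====

-- B replaces A's per-element if/elif bucket selection with staged cumulative counts
-- (how many lengths are ≤5, ≤10, ≤15) and forms the buckets as their differences; same O(n) cost.

-- ===== PORT A =====
-- error['text_length'] : first-match association-list lookup (KeyError = none, excluded by Pre_; getD 0 is unreachable inside Pre_)
def analyze_errors_by_length_py (errors : List (List (String × Int))) : List (String × Int) :=
  let init : PySem.Dict String Int :=
    PySem.Dict.ofList [("1-5 words", 0), ("6-10 words", 0), ("11-15 words", 0), ("16+ words", 0)]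
  let final := errors.foldl (fun d error =>
    let length := (List.lookup "text_length" error).getD 0
    if length ≤ 5 then d.modify "1-5 words" 0 (· + 1)
    else if length ≤ 10 then d.modify "6-10 words" 0 (· + 1)
    else if length ≤ 15 then d.modify "11-15 words" 0 (· + 1)
    else d.modify "16+ words" 0 (· + 1)) init
  final.items

-- ===== PORT B =====
-- sum(1 for l in lengths if l <= c), as the generator-sum fold it is in Source B
def pvCnt (c : Int) (L : List Int) : Int :=
  L.foldl (fun s l => if l ≤ c then s + 1 else s) 0

-- the dict literal with four distinct keys is the association list in insertion order
def analyze_errors_by_length_py_alt (errors : List (List (String × Int))) : List (String × Int) :=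
  let lengths := errors.map (fun e => (List.lookup "text_length" e).getD 0)
  let c5 := pvCnt 5 lengths
  let c10 := pvCnt 10 lengths
  let c15 := pvCnt 15 lengths
  [("1-5 words", c5), ("6-10 words", c10 - c5),
   ("11-15 words", c15 - c10), ("16+ words", (lengths.length : Int) - c15)]

-- ===== PRECONDITION & SPEC =====
-- Pre_: every error dict has the key 'text_length' (A raises KeyError otherwise; so does B)
def Pre_analyze_errors_by_length_py (errors : List (List (String × Int))) : Prop :=
  ∀ e ∈ errors, (List.lookup "text_length" e).isSome = true
instance (errors : List (List (String × Int))) : Decidable (Pre_analyze_errors_by_length_py errors) := by unfold Pre_analyze_errors_by_length_py; infer_instance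
def pvWitness_analyze_errors_by_length_py : (List (List (String × Int))) :=
  [[("text_length", 3)], [("text_length", 12)], [("text_length", 20)]]
def Spec_analyze_errors_by_length_py (errors : List (List (String × Int))) (out : List (String × Int)) : Prop := out = analyze_errors_by_length_py_alt errors
instance (errors : List (List (String × Int))) (out : List (String × Int)) : Decidable (Spec_analyze_errors_by_length_py errors out) := by unfold Spec_analyze_errors_by_length_py; infer_instance

-- ===== CLAIM (what is proved, stated in full; the proofs are below) =====
def Claim_equal_analyze_errors_by_length_py : Prop := ∀ (errors : List (List (String × Int))), Dom_analyze_errors_by_length_py errors → Pre_analyze_errors_by_length_py errors → Spec_analyze_errors_by_length_py errors (analyze_errors_by_length_py errors)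

-- ===== LEMMAS AND PROOFS =====

lemma pvCnt_shift (c : Int) (L : List Int) :
    ∀ s : Int, L.foldl (fun s l => if l ≤ c then s + 1 else s) s = s + pvCnt c L := by
  induction L with
  | nil => intro s; simp [pvCnt]
  | cons l L ih =>
      intro s
      simp only [pvCnt, List.foldl_cons]
      rw [ih, ih]
      by_cases h : l ≤ c <;> simp [h] <;> push_cast <;> ring

lemma pvCnt_cons (c l : Int) (L : List Int) :
    pvCnt c (l :: L) = (if l ≤ c then 1 else 0) + pvCnt c L := by
  simp only [pvCnt, List.foldl_cons]
  by_cases h : l ≤ c <;> simp [h, pvCnt_shift]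

-- loop invariant: A's dict fold from the 4-key dict with values c0..c3 has items equal to
-- the labels paired with c0..c3 plus B's cumulative-count differences
lemma pv_invariant (errors : List (List (String × Int))) :
    ∀ (c0 c1 c2 c3 : Int),
      (errors.foldl (fun d error =>
        let length := (List.lookup "text_length" error).getD 0
        if length ≤ 5 then d.modify "1-5 words" 0 (· + 1)
        else if length ≤ 10 then d.modify "6-10 words" 0 (· + 1)
        else if length ≤ 15 then d.modify "11-15 words" 0 (· + 1)
        else d.modify "16+ words" 0 (· + 1))
        (PySem.Dict.mk [("1-5 words", c0), ("6-10 words", c1), ("11-15 words", c2), ("16+ words", c3)])).items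
      = (let L := errors.map (fun e => (List.lookup "text_length" e).getD 0)
         [("1-5 words", c0 + pvCnt 5 L), ("6-10 words", c1 + (pvCnt 10 L - pvCnt 5 L)),
          ("11-15 words", c2 + (pvCnt 15 L - pvCnt 10 L)),
          ("16+ words", c3 + ((L.length : Int) - pvCnt 15 L))]) := by
  induction errors with
  | nil => intro c0 c1 c2 c3; simp [pvCnt]
  | cons e rest ih =>
      intro c0 c1 c2 c3
      simp only [List.foldl_cons, List.map_cons, pvCnt_cons, List.length_cons]
      set l : Int := (List.lookup "text_length" e).getD 0 with hl
      by_cases h5 : l ≤ 5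
      · have h10 : l ≤ 10 := by omega
        have h15 : l ≤ 15 := by omega
        simp only [if_pos h5, if_pos h10, if_pos h15]
        rw [show (PySem.Dict.mk [("1-5 words", c0), ("6-10 words", c1), ("11-15 words", c2), ("16+ words", c3)]).modify "1-5 words" 0 (· + 1)
              = PySem.Dict.mk [("1-5 words", c0 + 1), ("6-10 words", c1), ("11-15 words", c2), ("16+ words", c3)] from by
            simp [PySem.Dict.modify, PySem.Dict.insert, PySem.Dict.getD, PySem.Dict.get?]]
        rw [ih (c0 + 1) c1 c2 c3]
        simp only [List.cons.injEq, Prod.mk.injEq, true_and, and_true]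
        push_cast; and_intros <;> ring
      · by_cases h10 : l ≤ 10
        · have h15 : l ≤ 15 := by omega
          simp only [if_neg h5, if_pos h10, if_pos h15]
          rw [show (PySem.Dict.mk [("1-5 words", c0), ("6-10 words", c1), ("11-15 words", c2), ("16+ words", c3)]).modify "6-10 words" 0 (· + 1)
                = PySem.Dict.mk [("1-5 words", c0), ("6-10 words", c1 + 1), ("11-15 words", c2), ("16+ words", c3)] from by
              simp [PySem.Dict.modify, PySem.Dict.insert, PySem.Dict.getD, PySem.Dict.get?]]
          rw [ih c0 (c1 + 1) c2 c3]
          simp only [List.cons.injEq, Prod.mk.injEq, true_and, and_true]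
          push_cast; and_intros <;> ring
        · by_cases h15 : l ≤ 15
          · simp only [if_neg h5, if_neg h10, if_pos h15]
            rw [show (PySem.Dict.mk [("1-5 words", c0), ("6-10 words", c1), ("11-15 words", c2), ("16+ words", c3)]).modify "11-15 words" 0 (· + 1)
                  = PySem.Dict.mk [("1-5 words", c0), ("6-10 words", c1), ("11-15 words", c2 + 1), ("16+ words", c3)] from by
                simp [PySem.Dict.modify, PySem.Dict.insert, PySem.Dict.getD, PySem.Dict.get?]]
            rw [ih c0 c1 (c2 + 1) c3]
            simp only [List.cons.injEq, Prod.mk.injEq, true_and, and_true]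
            push_cast; and_intros <;> ring
          · simp only [if_neg h5, if_neg h10, if_neg h15]
            rw [show (PySem.Dict.mk [("1-5 words", c0), ("6-10 words", c1), ("11-15 words", c2), ("16+ words", c3)]).modify "16+ words" 0 (· + 1)
                  = PySem.Dict.mk [("1-5 words", c0), ("6-10 words", c1), ("11-15 words", c2), ("16+ words", c3 + 1)] from by
                simp [PySem.Dict.modify, PySem.Dict.insert, PySem.Dict.getD, PySem.Dict.get?]]
            rw [ih c0 c1 c2 (c3 + 1)]
            simp only [List.cons.injEq, Prod.mk.injEq, true_and, and_true]
            push_cast; and_intros <;> ring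

-- ===== VERDICT (by name: the statement is the Claim_ definition above) =====
theorem analyze_errors_by_length_py_spec : Claim_equal_analyze_errors_by_length_py := by
  intro errors _ _
  unfold Spec_analyze_errors_by_length_py analyze_errors_by_length_py analyze_errors_by_length_py_alt
  have h := pv_invariant errors 0 0 0 0
  simp only [zero_add] at h
  simpa [PySem.Dict.ofList, List.length_map] using h
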